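-- pv_equiv track=rewrite | github.com/M0o2leesea/python-challenges | dictionary_advance3.py | count_first_letter
-- ===== SOURCE A (Python) =====
-- def count_first_letter(names):
-- #Begin by creating an empty dictionary named something like letters. Loop through the keys of names and access the first letter of each the key using key[0].
-- #If that letter is not a key in letters, create a new key/value pair where the key is key[0] and the value is the length of names[key].
-- #If that letter is a key in letters, simply add the length of names[key] to value associated with key[0] in letters.
--     letters = {}
--     for key in names:
--         if key[0] not in letters:
--             letters[key[0]] = len(names[key])
--         else:
--             letters[key[0]] += len(names[key])
--     return letters
-- ===== SOURCE B (Python) =====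
-- def count_first_letter(names):
--     # Grouping formulation: list the distinct first letters in order of first
--     # appearance, then for each letter sum the lengths of the lists of all
--     # keys starting with it (dict comprehension instead of a streaming dict).
--     order = list(dict.fromkeys(k[0] for k in names))
--     return {c: sum(len(names[k]) for k in names if k[0] == c) for c in order}
-- ===== Notes on version B (the rewrite author's own statement) =====
-- stated objective: alternative
-- what changed: Replaces the streaming running-total dict with a grouping pass: collect the distinct first letters in first-occurrence order, then build the result as a dict comprehension summing len(names[k]) over the keys of each group.
-- outside the precondition, e.g. on count_first_letter({'': [1]}): A raises IndexError, B raises IndexError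
import Mathlib
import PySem

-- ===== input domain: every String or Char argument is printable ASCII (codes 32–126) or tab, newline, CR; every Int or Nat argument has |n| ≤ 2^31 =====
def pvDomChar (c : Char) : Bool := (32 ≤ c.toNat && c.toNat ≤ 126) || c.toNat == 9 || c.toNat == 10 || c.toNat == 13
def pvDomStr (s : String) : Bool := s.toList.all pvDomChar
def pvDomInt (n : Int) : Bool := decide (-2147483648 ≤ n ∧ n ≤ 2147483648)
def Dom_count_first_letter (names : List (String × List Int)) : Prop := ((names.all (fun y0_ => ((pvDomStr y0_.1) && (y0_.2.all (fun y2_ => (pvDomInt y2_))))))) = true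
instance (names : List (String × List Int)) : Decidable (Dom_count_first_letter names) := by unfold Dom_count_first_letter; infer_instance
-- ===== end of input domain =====

-- B replaces A's streaming running-total dict by a grouping pass (distinct first
-- letters in first-occurrence order, then a per-letter sum); equal cost, no speed claim.

-- key[0] as a one-character string; total rendering, exact for nonempty keys (Pre_).
def pvFirst (s : String) : String := String.ofList (PySem.Str.pyGet? s 0).toList

-- ===== PORT A =====
def count_first_letter (names : List (String × List Int)) : List (String × Int) :=
  (names.foldl (fun (letters : PySem.Dict String Int) kv =>
      if letters.contains (pvFirst kv.1) = false then
        letters.insert (pvFirst kv.1) ((PySem.Dict.getD ⟨names⟩ kv.1 []).length : Int)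
      else
        letters.modify (pvFirst kv.1) 0 (· + ((PySem.Dict.getD ⟨names⟩ kv.1 []).length : Int)))
    PySem.Dict.empty).items

-- ===== PORT B =====
def count_first_letter_alt (names : List (String × List Int)) : List (String × Int) :=
  (PySem.List.dedup (names.map (fun kv => pvFirst kv.1))).map
    (fun c => (c, ((names.filter (fun kv => pvFirst kv.1 == c)).map
                     (fun kv => ((PySem.Dict.getD ⟨names⟩ kv.1 []).length : Int))).sum))

-- ===== PRECONDITION & SPEC =====
-- Pre_ excludes keys that are the empty string (key[0] raises IndexError in A and B alike)
-- and duplicate keys, which a Python dict cannot represent (they collapse to the last value).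
def Pre_count_first_letter (names : List (String × List Int)) : Prop :=
  (names.all (fun kv => kv.1 ≠ "")) = true ∧ (names.map (·.1)).Nodup
instance (names : List (String × List Int)) : Decidable (Pre_count_first_letter names) := by
  unfold Pre_count_first_letter; infer_instance

def pvWitness_count_first_letter : (List (String × List Int)) :=
  [("ab", [1, 2]), ("ax", [3]), ("b", [])]

def Spec_count_first_letter (names : List (String × List Int)) (out : List (String × Int)) : Prop := out = count_first_letter_alt names
instance (names : List (String × List Int)) (out : List (String × Int)) : Decidable (Spec_count_first_letter names out) := by unfold Spec_count_first_letter; infer_instance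

-- ===== CLAIM (what is proved, stated in full; the proofs are below) =====
def Claim_equal_count_first_letter : Prop := ∀ (names : List (String × List Int)), Dom_count_first_letter names → Pre_count_first_letter names → Spec_count_first_letter names (count_first_letter names)

-- ===== LEMMAS AND PROOFS =====


-- A's branch ('new key → insert, else add') is one Dict.modify step.
theorem pvStep_eq_modify (d : PySem.Dict String Int) (c : String) (v : Int) :
    (if d.contains c = false then d.insert c v else d.modify c 0 (· + v)) =
      d.modify c 0 (· + v) := by
  by_cases h : d.contains c = false
  · simp only [h, if_true]
    simp [PySem.Dict.modify, PySem.Dict.getD_of_not_contains d (0 : Int) h]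
  · simp [h]

-- getD after a grouped-sum modify fold = old value + sum of weights of matching elements.
theorem pvGetD_foldl_modify_add {α : Type} (l : List α) (key : α → String) (w : α → Int)
    (d : PySem.Dict String Int) (c : String) :
    (l.foldl (fun d x => d.modify (key x) 0 (· + w x)) d).getD c 0 =
      d.getD c 0 + ((l.filter (fun x => key x == c)).map w).sum := by
  induction l generalizing d with
  | nil => simp
  | cons x xs ih =>
    simp only [List.foldl_cons, ih, List.filter_cons]
    rw [PySem.Dict.getD_modify]
    by_cases h : c = key x
    · simp [h, eq_comm]; ring
    · have hb : (key x == c) = false := by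
        simp only [beq_eq_false_iff_ne]; exact fun hh => h hh.symm
      simp [h, hb]

-- ===== VERDICT (by name: the statement is the Claim_ definition above) =====
theorem count_first_letter_spec : Claim_equal_count_first_letter := by
  intro names _ _
  unfold Spec_count_first_letter count_first_letter count_first_letter_alt
  have h1 : (names.foldl (fun (letters : PySem.Dict String Int) kv =>
      if letters.contains (pvFirst kv.1) = false then
        letters.insert (pvFirst kv.1) ((PySem.Dict.getD ⟨names⟩ kv.1 []).length : Int)
      else
        letters.modify (pvFirst kv.1) 0 (· + ((PySem.Dict.getD ⟨names⟩ kv.1 []).length : Int)))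
    PySem.Dict.empty) =
      names.foldl (fun d kv =>
        d.modify (pvFirst kv.1) 0 (· + ((PySem.Dict.getD ⟨names⟩ kv.1 []).length : Int)))
        PySem.Dict.empty := by
    congr 1
    funext d kv
    exact pvStep_eq_modify d (pvFirst kv.1) _
  rw [h1]
  have hnd : (names.foldl (fun d kv =>
      d.modify (pvFirst kv.1) 0 (· + ((PySem.Dict.getD ⟨names⟩ kv.1 []).length : Int)))
      PySem.Dict.empty).keys.Nodup := by
    exact PySem.Dict.nodup_keys_foldl_modify_key names (fun kv => pvFirst kv.1) 0 _
      PySem.Dict.empty (by simp)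
  rw [PySem.Dict.items_eq_map_keys _ hnd 0]
  rw [PySem.Dict.keys_foldl_modify_key]
  have hkeys : PySem.Set.update (PySem.Dict.empty (κ := String) (ν := Int)).keys
      (names.map (fun kv => pvFirst kv.1)) =
      PySem.List.dedup (names.map (fun kv => pvFirst kv.1)) := by
    simp [PySem.Dict.keys_empty, PySem.Set.update_nil_left]
  rw [hkeys]
  apply List.map_congr_left
  intro c _
  rw [pvGetD_foldl_modify_add names (fun kv => pvFirst kv.1)
      (fun kv => ((PySem.Dict.getD ⟨names⟩ kv.1 []).length : Int)) PySem.Dict.empty c]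
  simp
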